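-- pv_equiv track=rewrite | github.com/raeez/chiral-bar-cobar | compute/lib/w5_full_ope_delta_f2_engine.py | _half_edge_channels
-- ===== SOURCE A (Python) =====
-- from typing import Any, Dict, List, Optional, Tuple
--
-- _GENUS2_GRAPHS = [
--     # (name, vertices=[(genus, valence)], edges=[(type, v1, v2)], aut)
--     ('smooth',    [(2, 0)],          [],                                     1),
--     ('fig_eight', [(1, 2)],          [('self', 0)],                          2),
--     ('banana',    [(0, 4)],          [('self', 0), ('self', 0)],             8),
--     ('dumbbell',  [(1, 1), (1, 1)],  [('bridge', 0, 1)],                    2),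
--     ('theta',     [(0, 3), (0, 3)],  [('bridge', 0, 1)] * 3,               12),
--     ('lollipop',  [(0, 3), (1, 1)],  [('self', 0), ('bridge', 0, 1)],       2),
--     ('barbell',   [(0, 3), (0, 3)],  [('self', 0), ('self', 1),
--                                       ('bridge', 0, 1)],                     8),
-- ]
--
-- def _half_edge_channels(graph_idx: int,
--                         sigma: Tuple[str, ...]) -> List[List[str]]:
--     """For each vertex, return half-edge channel labels."""
--     _, vertices, edges, _ = _GENUS2_GRAPHS[graph_idx]
--     n_v = len(vertices)
--     channels_at_v: List[List[str]] = [[] for _ in range(n_v)]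
--     for e_idx, edge in enumerate(edges):
--         ch = sigma[e_idx]
--         if edge[0] == 'self':
--             v = edge[1]
--             channels_at_v[v].append(ch)
--             channels_at_v[v].append(ch)
--         elif edge[0] == 'bridge':
--             channels_at_v[edge[1]].append(ch)
--             channels_at_v[edge[2]].append(ch)
--     return channels_at_v
-- ===== SOURCE B (Python) =====
-- from typing import List, Tuple
--
-- _GENUS2_GRAPHS = [
--     ('smooth',    [(2, 0)],          [],                                     1),
--     ('fig_eight', [(1, 2)],          [('self', 0)],                          2),
--     ('banana',    [(0, 4)],          [('self', 0), ('self', 0)],             8),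
--     ('dumbbell',  [(1, 1), (1, 1)],  [('bridge', 0, 1)],                    2),
--     ('theta',     [(0, 3), (0, 3)],  [('bridge', 0, 1)] * 3,               12),
--     ('lollipop',  [(0, 3), (1, 1)],  [('self', 0), ('bridge', 0, 1)],       2),
--     ('barbell',   [(0, 3), (0, 3)],  [('self', 0), ('self', 1),
--                                       ('bridge', 0, 1)],                     8),
-- ]
--
-- def _half_edge_channels(graph_idx: int,
--                         sigma: Tuple[str, ...]) -> List[List[str]]:
--     """Vertex-outer formulation: for each vertex, scan the edges once and
--     take each edge's channel with its multiplicity at that vertex."""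
--     _, vertices, edges, _ = _GENUS2_GRAPHS[graph_idx]
--
--     def mult(edge, v):
--         if edge == ('self', v):
--             return 2
--         if edge[0] == 'bridge' and v in (edge[1], edge[2]):
--             return 1
--         return 0
--
--     return [[ch
--              for e_idx, edge in enumerate(edges)
--              for ch in [sigma[e_idx]] * mult(edge, v)]
--             for v in range(len(vertices))]
-- ===== Notes on version B (the rewrite author's own statement) =====
-- stated objective: alternative
-- what changed: Replaced the edge-outer single pass that mutates per-vertex accumulator lists with a vertex-outer nested scan that builds each vertex's channel list directly from edge multiplicities.
import Mathlib
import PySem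

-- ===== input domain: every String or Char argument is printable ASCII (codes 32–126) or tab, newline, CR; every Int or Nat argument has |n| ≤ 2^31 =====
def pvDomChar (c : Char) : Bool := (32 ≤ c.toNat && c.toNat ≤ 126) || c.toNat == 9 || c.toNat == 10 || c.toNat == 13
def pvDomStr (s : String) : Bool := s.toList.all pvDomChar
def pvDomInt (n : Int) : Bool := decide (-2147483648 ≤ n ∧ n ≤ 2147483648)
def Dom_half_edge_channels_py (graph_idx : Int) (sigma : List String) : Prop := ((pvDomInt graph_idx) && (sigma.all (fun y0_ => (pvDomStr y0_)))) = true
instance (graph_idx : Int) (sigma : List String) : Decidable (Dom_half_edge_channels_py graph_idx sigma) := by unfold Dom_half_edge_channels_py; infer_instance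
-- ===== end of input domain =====

-- B is a vertex-outer nested scan instead of A's edge-outer mutating pass: an alternative decomposition, not faster.

-- edge tuples ('self', v) / ('bridge', v1, v2) of the module constant
inductive PvEdge
  | self : Nat → PvEdge
  | bridge : Nat → Nat → PvEdge
deriving DecidableEq, Repr

-- the module constant _GENUS2_GRAPHS: (name, vertices, edges, aut)
def pvGraphs : List (String × List (Int × Int) × List PvEdge × Int) :=
  [ ("smooth",    [(2, 0)],           [],                                                1),
    ("fig_eight", [(1, 2)],           [.self 0],                                         2),
    ("banana",    [(0, 4)],           [.self 0, .self 0],                                8),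
    ("dumbbell",  [(1, 1), (1, 1)],   [.bridge 0 1],                                     2),
    ("theta",     [(0, 3), (0, 3)],   [.bridge 0 1, .bridge 0 1, .bridge 0 1],          12),
    ("lollipop",  [(0, 3), (1, 1)],   [.self 0, .bridge 0 1],                            2),
    ("barbell",   [(0, 3), (0, 3)],   [.self 0, .self 1, .bridge 0 1],                   8) ]

-- ===== PORT A =====
-- edge-outer pass appending into a list of per-vertex accumulators
def half_edge_channels_py (graph_idx : Int) (sigma : List String) : List (List String) :=
  match PySem.List.pyGet? pvGraphs graph_idx with
  | none => []   -- IndexError in Python; excluded by Pre_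
  | some (_, vertices, edges, _) =>
    let n_v := vertices.length
    let init : List (List String) := List.replicate n_v []
    (PySem.List.enumerate edges).foldl (fun acc p =>
      let ch := ((PySem.List.pyGet? sigma p.1).getD "")   -- IndexError when none; excluded by Pre_
      match p.2 with
      | .self v => (acc.modify v (fun l => l ++ [ch])).modify v (fun l => l ++ [ch])
      | .bridge v1 v2 => (acc.modify v1 (fun l => l ++ [ch])).modify v2 (fun l => l ++ [ch])) init

-- ===== PORT B =====
def pvMult (e : PvEdge) (v : Nat) : Nat :=
  match e with
  | .self w => if w = v then 2 else 0
  | .bridge a b => if a = v ∨ b = v then 1 else 0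

-- vertex-outer nested scan: each vertex's list is built directly
def half_edge_channels_py_alt (graph_idx : Int) (sigma : List String) : List (List String) :=
  match PySem.List.pyGet? pvGraphs graph_idx with
  | none => []   -- IndexError in Python; excluded by Pre_
  | some (_, vertices, edges, _) =>
    (List.range vertices.length).map (fun v =>
      (PySem.List.enumerate edges).flatMap (fun p =>
        List.replicate (pvMult p.2 v) ((PySem.List.pyGet? sigma p.1).getD "")))

-- ===== PRECONDITION & SPEC =====
-- Pre_: graph_idx must be a valid Python index into the 7-element graph table
-- and sigma must carry at least one channel per edge of that graph (else IndexError).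
def Pre_half_edge_channels_py (graph_idx : Int) (sigma : List String) : Prop :=
  -7 ≤ graph_idx ∧ graph_idx < 7 ∧
    (PySem.List.pyGet? ([0, 1, 2, 1, 3, 2, 3] : List Nat) graph_idx).getD 0 ≤ sigma.length
instance (graph_idx : Int) (sigma : List String) : Decidable (Pre_half_edge_channels_py graph_idx sigma) := by unfold Pre_half_edge_channels_py; infer_instance

def pvWitness_half_edge_channels_py : Int × List String := (6, ["a", "b", "c"])

def Spec_half_edge_channels_py (graph_idx : Int) (sigma : List String) (out : List (List String)) : Prop := out = half_edge_channels_py_alt graph_idx sigma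
instance (graph_idx : Int) (sigma : List String) (out : List (List String)) : Decidable (Spec_half_edge_channels_py graph_idx sigma out) := by unfold Spec_half_edge_channels_py; infer_instance

-- ===== CLAIM (what is proved, stated in full; the proofs are below) =====
def Claim_equal_half_edge_channels_py : Prop := ∀ (graph_idx : Int) (sigma : List String), Dom_half_edge_channels_py graph_idx sigma → Pre_half_edge_channels_py graph_idx sigma → Spec_half_edge_channels_py graph_idx sigma (half_edge_channels_py graph_idx sigma)

-- ===== LEMMAS AND PROOFS =====

-- ===== VERDICT (by name: the statement is the Claim_ definition above) =====
theorem half_edge_channels_py_spec : Claim_equal_half_edge_channels_py := by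
  intro graph_idx sigma _ hpre
  unfold Spec_half_edge_channels_py
  obtain ⟨h1, h2, -⟩ := hpre
  interval_cases graph_idx <;> rfl
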